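-- pv_equiv track=rewrite | github.com/joeyda3rd/MarketPipe | tests/integration/test_cli_option_validation.py | _has_actual_errors
-- ===== SOURCE A (Python) =====
-- def _has_actual_errors(stderr: str) -> bool:
--     """Check if stderr contains actual error messages (not just operational logs)."""
--     if not stderr:
--         return False
--
--     # Look for actual error indicators
--     error_patterns = [
--         'ERROR',
--         'CRITICAL',
--         'FATAL',
--         'Exception',
--         'Traceback',
--         'Error:',
--         'Failed:',
--         'No such',
--         'Permission denied',
--         'Connection refused'
--     ]
--
--     lines = stderr.split('\n')
--     for line in lines:
--         if any(pattern in line for pattern in error_patterns):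
--             return True
--
--     return False
-- ===== SOURCE B (Python) =====
-- import re
--
-- _ERROR_RE = re.compile('|'.join(re.escape(p) for p in [
--     'ERROR',
--     'CRITICAL',
--     'FATAL',
--     'Exception',
--     'Traceback',
--     'Error:',
--     'Failed:',
--     'No such',
--     'Permission denied',
--     'Connection refused',
-- ]))
--
--
-- def _has_actual_errors(stderr: str) -> bool:
--     """Check if stderr contains actual error messages (not just operational logs)."""
--     if not stderr:
--         return False
--     return bool(_ERROR_RE.search(stderr))
-- ===== Notes on version B (the rewrite author's own statement) =====
-- stated objective: idiomatic
-- what changed: Replaced the per-line split plus any()-over-patterns double scan with a single precompiled regex alternation searched once over the whole stderr text (valid because no pattern contains a newline).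
import Mathlib
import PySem

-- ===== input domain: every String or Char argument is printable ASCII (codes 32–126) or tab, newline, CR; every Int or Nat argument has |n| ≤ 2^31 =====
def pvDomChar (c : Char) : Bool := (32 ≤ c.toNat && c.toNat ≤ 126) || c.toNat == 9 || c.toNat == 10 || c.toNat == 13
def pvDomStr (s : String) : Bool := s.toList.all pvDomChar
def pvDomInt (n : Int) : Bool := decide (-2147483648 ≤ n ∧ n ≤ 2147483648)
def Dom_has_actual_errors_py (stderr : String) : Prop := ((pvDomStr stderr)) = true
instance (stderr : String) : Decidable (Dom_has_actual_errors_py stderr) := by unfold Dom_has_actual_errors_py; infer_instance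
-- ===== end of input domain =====

-- B replaces A's per-line split and per-pattern scan with one left-to-right alternation search over the whole text (idiomatic regex style); same result.


-- the shared pattern list (same literals, same order, as in both Pythons)
def pvPatterns : List String :=
  ["ERROR", "CRITICAL", "FATAL", "Exception", "Traceback",
   "Error:", "Failed:", "No such", "Permission denied", "Connection refused"]

-- ===== PORT A =====
-- A: guard on empty, split into lines on '\n', for each line any(pattern in line)
def has_actual_errors_py (stderr : String) : Bool :=
  if stderr == "" then false
  else
    (PySem.Chars.splitOn stderr.toList ['\n']).any
      (fun line => pvPatterns.any (fun p => PySem.Chars.isIn p.toList line))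

-- ===== PORT B =====
-- B: compiled alternation of the same (escaped, hence literal) patterns searched once over the
-- whole text: re.search tries each start position left to right, and at each position tries the
-- alternatives in order — ported step for step as pvReSearch (exact for this literal-only alternation).
def pvAltMatch (cs : List Char) : Bool :=
  pvPatterns.any (fun p => PySem.Chars.startswith cs p.toList)

def pvReSearch : List Char → Bool
  | [] => pvAltMatch []
  | c :: rest => pvAltMatch (c :: rest) || pvReSearch rest

def has_actual_errors_py_alt (stderr : String) : Bool :=
  if stderr == "" then false
  else pvReSearch stderr.toList

-- ===== PRECONDITION & SPEC =====
def Spec_has_actual_errors_py (stderr : String) (out : Bool) : Prop := out = has_actual_errors_py_alt stderr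
instance (stderr : String) (out : Bool) : Decidable (Spec_has_actual_errors_py stderr out) := by unfold Spec_has_actual_errors_py; infer_instance

-- ===== CLAIM (what is proved, stated in full; the proofs are below) =====
def Claim_equal_has_actual_errors_py : Prop := ∀ (stderr : String), Dom_has_actual_errors_py stderr → Spec_has_actual_errors_py stderr (has_actual_errors_py stderr)

-- ===== LEMMAS AND PROOFS =====

-- proof-side model of s.split('\n') (single-character separator)
def pvSplit (c : Char) : List Char → List (List Char)
  | [] => [[]]
  | a :: rest => if a = c then [] :: pvSplit c rest
                 else (pvSplit c rest).modifyHead (a :: ·)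

lemma pvSplit_ne_nil (c : Char) (cs : List Char) : pvSplit c cs ≠ [] := by
  induction cs with
  | nil => simp [pvSplit]
  | cons a rest ih =>
      unfold pvSplit
      split_ifs
      · simp
      · cases h : pvSplit c rest with
        | nil => exact absurd h ih
        | cons x xs => simp [List.modifyHead]

lemma pvGo_eq (c : Char) : ∀ (fuel : Nat) (l cur : List Char) (accs : List (List Char)),
    l.length < fuel →
    PySem.Chars.splitOn.go [c] fuel l cur accs
      = accs.reverse ++ (pvSplit c l).modifyHead (cur.reverse ++ ·) := by
  intro fuel
  induction fuel with
  | zero => intro l cur accs h; omega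
  | succ fuel ih =>
      intro l cur accs h
      cases l with
      | nil => simp [PySem.Chars.splitOn.go, pvSplit, List.modifyHead]
      | cons a rest =>
          by_cases hac : a = c
          · subst hac
            rw [PySem.Chars.splitOn.go]
            simp only [List.isPrefixOf, beq_self_eq_true, Bool.true_and, if_true,
                       List.length_cons, List.length_nil, List.drop_succ_cons, List.drop_zero]
            rw [ih rest [] (cur.reverse :: accs) (by simp at h ⊢; omega)]
            simp only [pvSplit, List.modifyHead, List.reverse_cons, List.append_assoc,
                       List.nil_append, List.reverse_nil, List.singleton_append]
            cases pvSplit a rest <;> simp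
          · rw [PySem.Chars.splitOn.go]
            have : ([c].isPrefixOf (a :: rest)) = false := by
              simp [List.isPrefixOf]
              exact fun hh => hac hh.symm
            rw [this]
            simp only [if_false, Bool.false_eq_true]
            rw [ih rest (a :: cur) accs (by simp at h ⊢; omega)]
            simp only [pvSplit, if_neg hac]
            cases hS : pvSplit c rest with
            | nil => exact absurd hS (pvSplit_ne_nil c rest)
            | cons hh tt => simp [List.modifyHead]

lemma pvSplitOn_eq (c : Char) (cs : List Char) :
    PySem.Chars.splitOn cs [c] = pvSplit c cs := by
  rw [PySem.Chars.splitOn, pvGo_eq c (cs.length + 1) cs [] [] (by omega)]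
  cases hS : pvSplit c cs with
  | nil => exact absurd hS (pvSplit_ne_nil c cs)
  | cons hh tt => simp [List.modifyHead]

lemma pvSplit_headI_prefix (c : Char) (cs : List Char) : (pvSplit c cs).headI <+: cs := by
  induction cs with
  | nil => simp [pvSplit]
  | cons a rest ih =>
      unfold pvSplit
      split_ifs with h
      · simp
      · cases hS : pvSplit c rest with
        | nil => exact absurd hS (pvSplit_ne_nil c rest)
        | cons hh tt =>
            simp only [List.modifyHead, List.headI]
            rw [hS] at ih
            exact List.cons_prefix_cons.mpr ⟨rfl, ih⟩

lemma pvSplit_mem_infix (c : Char) (cs : List Char) :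
    ∀ l, l ∈ pvSplit c cs → l <:+: cs := by
  induction cs with
  | nil => intro l h; simp [pvSplit] at h; simp [h]
  | cons a rest ih =>
      intro l h
      by_cases hc : a = c
      · simp only [pvSplit, if_pos hc, List.mem_cons] at h
        rcases h with h | h
        · simp [h]
        · exact List.infix_cons (ih l h)
      · simp only [pvSplit, if_neg hc] at h
        cases hS : pvSplit c rest with
        | nil => exact absurd hS (pvSplit_ne_nil c rest)
        | cons hh tt =>
            rw [hS] at h
            simp only [List.modifyHead, List.mem_cons] at h
            rcases h with h | h
            · subst h
              have := pvSplit_headI_prefix c (a :: rest)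
              rw [show pvSplit c (a :: rest) = (a :: hh) :: tt by
                    simp [pvSplit, if_neg hc, hS, List.modifyHead]] at this
              exact this.isInfix
            · exact List.infix_cons (ih l (by rw [hS]; exact List.mem_cons_of_mem _ h))

lemma pvSplit_head_of_prefix (c : Char) (cs : List Char) :
    ∀ p, p <+: cs → c ∉ p → p <+: (pvSplit c cs).headI := by
  induction cs with
  | nil => intro p hp _; simpa [pvSplit] using hp
  | cons a rest ih =>
      intro p hp hc
      by_cases hac : a = c
      · subst hac
        cases p with
        | nil => simp
        | cons b p' =>
            rcases List.cons_prefix_cons.mp hp with ⟨hb, _⟩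
            exact absurd (hb ▸ List.mem_cons_self) hc
      · simp only [pvSplit, if_neg hac]
        cases hS : pvSplit c rest with
        | nil => exact absurd hS (pvSplit_ne_nil c rest)
        | cons hh tt =>
            simp only [List.modifyHead, List.headI]
            cases p with
            | nil => simp
            | cons b p' =>
                rcases List.cons_prefix_cons.mp hp with ⟨hb, hp'⟩
                have := ih p' hp' (fun hm => hc (List.mem_cons_of_mem _ hm))
                rw [hS] at this
                exact List.cons_prefix_cons.mpr ⟨hb, this⟩

lemma pvSplit_infix_exists (c : Char) (cs : List Char) :
    ∀ p, p <:+: cs → c ∉ p → ∃ l ∈ pvSplit c cs, p <:+: l := by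
  induction cs with
  | nil =>
      intro p h _
      rw [List.infix_nil] at h
      exact ⟨[], by simp [pvSplit], by simp [h]⟩
  | cons a rest ih =>
      intro p h hc
      rcases List.infix_cons_iff.mp h with hpre | hinf
      · have hhead := pvSplit_head_of_prefix c (a :: rest) p hpre hc
        cases hS : pvSplit c (a :: rest) with
        | nil => exact absurd hS (pvSplit_ne_nil c (a :: rest))
        | cons hh tt =>
            rw [hS] at hhead
            exact ⟨hh, List.mem_cons_self, hhead.isInfix⟩
      · obtain ⟨l, hl, hpl⟩ := ih p hinf hc
        by_cases hac : a = c
        · exact ⟨l, by simp [pvSplit, if_pos hac, hl], hpl⟩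
        · simp only [pvSplit, if_neg hac]
          cases hS : pvSplit c rest with
          | nil => exact absurd hS (pvSplit_ne_nil c rest)
          | cons hh tt =>
              rw [hS] at hl
              simp only [List.modifyHead]
              rcases List.mem_cons.mp hl with hl' | hl'
              · exact ⟨a :: hh, List.mem_cons_self, List.infix_cons (hl' ▸ hpl)⟩
              · exact ⟨l, List.mem_cons_of_mem _ hl', hpl⟩

lemma pvReSearch_iff (cs : List Char) :
    pvReSearch cs = true ↔ ∃ p ∈ pvPatterns, p.toList <:+: cs := by
  induction cs with
  | nil =>
      simp [pvReSearch, pvAltMatch, PySem.Chars.startswith, List.any_eq_true,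
            List.isPrefixOf_iff_prefix, List.infix_nil, List.prefix_nil]
  | cons a rest ih =>
      simp only [pvReSearch, Bool.or_eq_true, ih, pvAltMatch, List.any_eq_true,
                 PySem.Chars.startswith, List.isPrefixOf_iff_prefix]
      constructor
      · rintro (⟨p, hp, hpre⟩ | ⟨p, hp, hinf⟩)
        · exact ⟨p, hp, hpre.isInfix⟩
        · exact ⟨p, hp, List.infix_cons hinf⟩
      · rintro ⟨p, hp, hinf⟩
        rcases List.infix_cons_iff.mp hinf with hpre | hinf'
        · exact Or.inl ⟨p, hp, hpre⟩
        · exact Or.inr ⟨p, hp, hinf'⟩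

lemma pvPatterns_newline_free : ∀ p ∈ pvPatterns, ('\n' : Char) ∉ p.toList := by decide

lemma pvMain_eq (cs : List Char) :
    ((PySem.Chars.splitOn cs ['\n']).any
      (fun line => pvPatterns.any (fun p => PySem.Chars.isIn p.toList line))) = pvReSearch cs := by
  rw [pvSplitOn_eq, Bool.eq_iff_iff, pvReSearch_iff]
  simp only [List.any_eq_true, PySem.Chars.isIn_iff_infix]
  constructor
  · rintro ⟨l, hl, p, hp, hinf⟩
    exact ⟨p, hp, hinf.trans (pvSplit_mem_infix '\n' cs l hl)⟩
  · rintro ⟨p, hp, hinf⟩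
    obtain ⟨l, hl, hpl⟩ := pvSplit_infix_exists '\n' cs p.toList hinf (pvPatterns_newline_free p hp)
    exact ⟨l, hl, p, hp, hpl⟩

-- ===== VERDICT (by name: the statement is the Claim_ definition above) =====
theorem has_actual_errors_py_spec : Claim_equal_has_actual_errors_py := by
  intro stderr _
  unfold Spec_has_actual_errors_py has_actual_errors_py has_actual_errors_py_alt
  by_cases h : stderr == ""
  · simp [h]
  · simp only [h, Bool.false_eq_true, if_false]
    exact pvMain_eq stderr.toList
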